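-- pv_equiv track=rewrite | github.com/joaojunior/hackerrank | find_largest_word/main.py | find_largest_word
-- ===== SOURCE A (Python) =====
-- def find_largest_word(words, target):
--     words = sorted(words, key=len, reverse=True)
--     for word in words:
--         i = 0
--         j = 0
--         while i < len(word) and j < len(target):
--             if word[i] == target[j]:
--                 i += 1
--                 j += 1
--             else:
--                 j += 1
--         if i == len(word):
--             return word
-- ===== SOURCE B (Python) =====
-- def find_largest_word(words, target):
--     # Single pass, no sort: keep the longest subsequence-word seen so far
--     # (strict '>' keeps the earliest among equal lengths, matching the
--     # stable reverse sort); the subsequence test consumes one iterator.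
--     def is_sub(w):
--         it = iter(target)
--         return all(c in it for c in w)
--
--     best = None
--     for w in words:
--         if (best is None or len(w) > len(best)) and is_sub(w):
--             best = w
--     return best
-- ===== Notes on version B (the rewrite author's own statement) =====
-- stated objective: faster
-- what changed: B removes the stable reverse sort entirely: one left-to-right pass keeps the longest word that is a subsequence of target (strict '>' preserves the earliest among equal lengths, reproducing the stable sort's tie-breaking), and the length guard short-circuits so the subsequence scan is skipped for every word not longer than the current best.
import Mathlib
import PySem

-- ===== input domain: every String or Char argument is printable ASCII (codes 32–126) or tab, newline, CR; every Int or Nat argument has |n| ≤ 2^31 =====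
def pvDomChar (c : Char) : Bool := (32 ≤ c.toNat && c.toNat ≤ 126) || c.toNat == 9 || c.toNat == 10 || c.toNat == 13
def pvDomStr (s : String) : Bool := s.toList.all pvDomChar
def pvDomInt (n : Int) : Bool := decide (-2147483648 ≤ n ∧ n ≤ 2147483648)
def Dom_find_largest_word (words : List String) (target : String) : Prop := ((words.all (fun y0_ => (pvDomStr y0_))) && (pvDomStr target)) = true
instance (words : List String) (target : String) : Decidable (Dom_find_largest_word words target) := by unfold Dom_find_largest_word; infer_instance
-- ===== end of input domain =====

-- B drops A's initial sort: a single pass keeps the longest subsequence-word seen so far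
-- (same result: the strict '>' keeps the earliest among equal lengths, like the stable sort).

-- ===== PORT A =====

-- the two-pointer while loop: returns the final value of i
def pvAWhile (word tgt : List Char) (i j : Nat) : Nat :=
  if i < word.length ∧ j < tgt.length then
    if word.getD i ' ' = tgt.getD j ' ' then pvAWhile word tgt (i + 1) (j + 1)
    else pvAWhile word tgt i (j + 1)
  else i
termination_by tgt.length - j

-- the 'for word in words: … return word' loop
def pvAFor (tgt : List Char) : List String → Option String
  | [] => none
  | w :: ws =>
      if pvAWhile w.toList tgt 0 0 = w.toList.length then some w else pvAFor tgt ws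

def find_largest_word (words : List String) (target : String) : Option String :=
  pvAFor target.toList (PySem.List.sorted words (fun w => w.toList.length) true)

-- ===== PORT B =====

-- is_sub: consume the target iterator left to right ('c in it' advances past the first match)
def pvIsSub : List Char → List Char → Bool
  | [], _ => true
  | _ :: _, [] => false
  | c :: w, d :: t => if c = d then pvIsSub w t else pvIsSub (c :: w) t

-- loop body: '(best is None or len(w) > len(best)) and is_sub(w)'
def pvBStep (tgt : List Char) (best : Option String) (w : String) : Option String :=
  if ((match best with
       | none => true
       | some b => decide (b.toList.length < w.toList.length)) && pvIsSub w.toList tgt) then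
    some w
  else best

def find_largest_word_alt (words : List String) (target : String) : Option String :=
  words.foldl (pvBStep target.toList) none

-- ===== PRECONDITION & SPEC =====
def Spec_find_largest_word (words : List String) (target : String) (out : Option String) : Prop := out = find_largest_word_alt words target
instance (words : List String) (target : String) (out : Option String) : Decidable (Spec_find_largest_word words target out) := by unfold Spec_find_largest_word; infer_instance

-- ===== CLAIM (what is proved, stated in full; the proofs are below) =====
def Claim_equal_find_largest_word : Prop := ∀ (words : List String) (target : String), Dom_find_largest_word words target → Spec_find_largest_word words target (find_largest_word words target)

-- ===== LEMMAS AND PROOFS =====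

-- A's while loop reaches i = len(word) iff the rest of word is a subsequence of the rest of target
theorem pvAWhile_eq_isSub (word tgt : List Char) (i j : Nat) (hi : i ≤ word.length) :
    (pvAWhile word tgt i j = word.length) ↔ pvIsSub (word.drop i) (tgt.drop j) = true := by
  revert hi
  induction i, j using pvAWhile.induct word tgt with
  | case1 i j h heq ih =>
      intro hi
      rw [pvAWhile, if_pos h, if_pos heq]
      rw [List.drop_eq_getElem_cons h.1, List.drop_eq_getElem_cons h.2]
      rw [List.getD_eq_getElem word ' ' h.1, List.getD_eq_getElem tgt ' ' h.2] at heq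
      rw [pvIsSub, if_pos heq]
      exact ih h.1
  | case2 i j h hne ih =>
      intro hi
      rw [pvAWhile, if_pos h, if_neg hne]
      rw [List.drop_eq_getElem_cons h.1, List.drop_eq_getElem_cons h.2]
      rw [List.getD_eq_getElem word ' ' h.1, List.getD_eq_getElem tgt ' ' h.2] at hne
      rw [pvIsSub, if_neg hne]
      rw [← List.drop_eq_getElem_cons h.1]
      exact ih hi
  | case3 i j h =>
      intro hi
      rw [pvAWhile, if_neg h]
      rcases Nat.lt_or_ge i word.length with hlt | hge
      · have hj : tgt.length ≤ j := by omega
        rw [List.drop_eq_getElem_cons hlt, List.drop_eq_nil_of_le hj, pvIsSub]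
        simp; omega
      · have : i = word.length := le_antisymm hi hge
        subst this
        simp [List.drop_length, pvIsSub]


-- the for-loop is find? of the subsequence test
theorem pvAFor_eq_find? (tgt : List Char) (ws : List String) :
    pvAFor tgt ws = ws.find? (fun w => pvIsSub w.toList tgt) := by
  induction ws with
  | nil => rfl
  | cons w ws ih =>
      rw [pvAFor, List.find?_cons]
      have h0 : (pvAWhile w.toList tgt 0 0 = w.toList.length)
          ↔ pvIsSub w.toList tgt = true := by
        simpa using pvAWhile_eq_isSub w.toList tgt 0 0 (Nat.zero_le _)
      by_cases hw : pvIsSub w.toList tgt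
      · rw [if_pos (h0.mpr hw), hw]
      · rw [if_neg (fun hc => hw (h0.mp hc)), ih]
        simp [Bool.eq_false_iff.mpr hw]

-- inserting w into a length-descending list commutes with B's step on the first match
theorem find?_insertBy (tgt : List Char) (w : String) (s : List String)
    (hs : s.Pairwise (fun a b => b.toList.length ≤ a.toList.length)) :
    (PySem.List.insertBy (fun a b => decide (b.toList.length < a.toList.length)) w s).find?
        (fun v => pvIsSub v.toList tgt)
      = pvBStep tgt (s.find? (fun v => pvIsSub v.toList tgt)) w := by
  induction s with
  | nil =>
      by_cases h : pvIsSub w.toList tgt <;>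
        simp [PySem.List.insertBy, pvBStep, h]
  | cons y ys ih =>
      rw [PySem.List.insertBy]
      by_cases hlt : y.toList.length < w.toList.length
      · simp only [hlt, decide_true, if_true]
        by_cases hw : pvIsSub w.toList tgt
        · rcases hf : (y :: ys).find? (fun v => pvIsSub v.toList tgt) with _ | v
          · simp [hw, pvBStep, hf]
          · have hv : v ∈ y :: ys := List.mem_of_find?_eq_some hf
            have hvy : v.toList.length ≤ y.toList.length := by
              rcases List.mem_cons.mp hv with h | h
              · exact h ▸ le_refl _
              · exact (List.pairwise_cons.mp hs).1 v h
            simp [hw, pvBStep, hf]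
            intro h
            exfalso
            simp only [← String.length_toList] at h
            omega
        · rcases hf : (y :: ys).find? (fun v => pvIsSub v.toList tgt) with _ | v <;>
            simp [hw, pvBStep, hf]
      · simp only [hlt, decide_false, Bool.false_eq_true, if_false]
        rw [List.find?_cons]
        by_cases hy : pvIsSub y.toList tgt
        · have : ¬ (y.toList.length < w.toList.length ∧ pvIsSub w.toList tgt = true) := by
            intro hc; exact hlt hc.1
          simp [hy, pvBStep]
          intro h1 _
          exfalso
          simp only [← String.length_toList] at h1
          omega
        · simp only [hy, List.find?_cons]
          rw [ih (List.pairwise_cons.mp hs).2]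


-- B's fold equals find? over the stable length-descending sort
theorem foldl_eq_find?_sorted (tgt : List Char) (ws : List String) :
    ws.foldl (pvBStep tgt) none
      = (PySem.List.sorted ws (fun w => w.toList.length) true).find? (fun v => pvIsSub v.toList tgt) := by
  induction ws using List.reverseRecOn with
  | nil => rfl
  | append_singleton ws w ih =>
      rw [List.foldl_append, List.foldl_cons, List.foldl_nil, ih,
        PySem.List.sorted_rev_eq_foldl_insertBy (ws ++ [w]), List.foldl_append,
        List.foldl_cons, List.foldl_nil, ← PySem.List.sorted_rev_eq_foldl_insertBy ws]
      exact (find?_insertBy tgt w _ (PySem.List.sorted_pairwise_rev ws _)).symm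

-- ===== VERDICT (by name: the statement is the Claim_ definition above) =====
theorem find_largest_word_spec : Claim_equal_find_largest_word := by
  intro words target _
  unfold Spec_find_largest_word find_largest_word find_largest_word_alt
  rw [pvAFor_eq_find?, foldl_eq_find?_sorted]
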